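-- pv_equiv track=rewrite | github.com/argrento/leetcode | 0816. Ambiguous Coordinates/solution.py | generate_float
-- ===== SOURCE A (Python) =====
-- def generate_float(s: str):
--     if not s or len(s) > 1 and s[0] == s[-1] == '0':
--         return []
--     if s[0] == '0':
--         if len(s) == 1:
--             return[s]
--         else:
--             return ['0.' + s[1:]]
--     if s[-1] == '0':
--         return [s]
--     floats = [s]
--     for idx in range(1, len(s)):
--         floats.append(s[:idx] + '.' + s[idx:])
--     return floats
-- ===== SOURCE B (Python) =====
-- def _valid(whole, frac):
--     # a split is printable iff: integer part nonempty, no leading zero on a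
--     # multi-char integer part, and the fractional part does not end in '0'
--     if not whole:
--         return False
--     if len(whole) > 1 and whole[0] == '0':
--         return False
--     if frac and frac[-1] == '0':
--         return False
--     return True
--
-- def generate_float(s):
--     # staged pipeline: enumerate all (integer-part, fraction) splits in order,
--     # filter with the validity predicate, then format the survivors
--     splits = [(s, '')] + [(s[:i], s[i:]) for i in range(1, len(s))]
--     return [w + '.' + f if f else w for (w, f) in splits if _valid(w, f)]
-- ===== Notes on version B (the rewrite author's own statement) =====
-- stated objective: simpler
-- what changed: A's chain of early-return special cases with an appending loop is replaced by a uniform staged pipeline: enumerate all (integer-part, fraction) splits, filter them with a standalone validity predicate on the split parts, then format the survivors; B has no special-case branches at all.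
import Mathlib
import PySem

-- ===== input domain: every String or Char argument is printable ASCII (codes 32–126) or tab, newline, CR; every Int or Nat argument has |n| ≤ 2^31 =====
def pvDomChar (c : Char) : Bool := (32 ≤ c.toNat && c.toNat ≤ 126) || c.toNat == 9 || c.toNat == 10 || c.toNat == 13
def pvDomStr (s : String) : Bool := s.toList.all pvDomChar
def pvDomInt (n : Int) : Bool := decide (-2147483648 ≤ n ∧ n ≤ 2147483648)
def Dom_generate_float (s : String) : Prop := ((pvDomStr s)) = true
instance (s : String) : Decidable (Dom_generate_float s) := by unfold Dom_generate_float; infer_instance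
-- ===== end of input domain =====

-- B replaces A's chain of special-case early returns + appending loop by a staged
-- generate-and-filter pipeline (enumerate splits, filter by a validity predicate, format).

-- ===== PORT A =====
def generate_float (s : String) : List String :=
  let l := s.toList
  if l.length = 0 ∨ (1 < l.length ∧ PySem.List.pyGetD l 0 ' ' = '0' ∧ PySem.List.pyGetD l (-1) ' ' = '0') then
    []
  else if PySem.List.pyGetD l 0 ' ' = '0' then
    if l.length = 1 then [s]
    else [String.ofList ('0' :: '.' :: PySem.List.slice l (some 1) none)]
  else if PySem.List.pyGetD l (-1) ' ' = '0' then [s]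
  else
    (PySem.List.pyRange 1 l.length 1).foldl
      (fun acc idx =>
        acc ++ [String.ofList (PySem.List.slice l none (some idx) ++ '.' :: PySem.List.slice l (some idx) none)])
      [s]

-- ===== PORT B =====
-- _valid(whole, frac) from Source B
def pvValid (whole frac : List Char) : Bool :=
  if whole = [] then false
  else if 1 < whole.length ∧ PySem.List.pyGetD whole 0 ' ' = '0' then false
  else if frac ≠ [] ∧ PySem.List.pyGetD frac (-1) ' ' = '0' then false
  else true

def generate_float_alt (s : String) : List String :=
  let l := s.toList
  let splits : List (List Char × List Char) :=
    (l, []) :: (PySem.List.pyRange 1 l.length 1).map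
      (fun i => (PySem.List.slice l none (some i), PySem.List.slice l (some i) none))
  (splits.filter (fun p => pvValid p.1 p.2)).map
    (fun p => if p.2 = [] then String.ofList p.1 else String.ofList (p.1 ++ '.' :: p.2))

-- ===== PRECONDITION & SPEC =====
def Spec_generate_float (s : String) (out : List String) : Prop := out = generate_float_alt s
instance (s : String) (out : List String) : Decidable (Spec_generate_float s out) := by unfold Spec_generate_float; infer_instance

-- ===== CLAIM =====
def Claim_equal_generate_float : Prop := ∀ (s : String), Dom_generate_float s → Spec_generate_float s (generate_float s)

-- ===== LEMMAS AND PROOFS =====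

-- the head of a nonempty prefix is the head of the list
theorem pyGetD_take_zero (L : List Char) (k : Nat) (hk : 1 ≤ k) (hL : L ≠ []) :
    PySem.List.pyGetD (L.take k) 0 ' ' = PySem.List.pyGetD L 0 ' ' := by
  cases L with
  | nil => simp at hL
  | cons a t =>
    cases k with
    | zero => omega
    | succ m => simp [PySem.List.pyGetD_zero_cons]

-- the last element of a proper suffix is the last of the list
theorem pyGetD_drop_last (L : List Char) (k : Nat) (hk : k < L.length) :
    PySem.List.pyGetD (L.drop k) (-1) ' ' = PySem.List.pyGetD L (-1) ' ' := by
  have hd : L.drop k ≠ [] := by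
    intro h
    have := List.drop_eq_nil_iff.mp h
    omega
  have hL : L ≠ [] := by
    intro h; subst h; simp at hk
  rw [PySem.List.pyGetD_neg_one _ _ hd, PySem.List.pyGetD_neg_one _ _ hL, List.getLast_drop]

theorem generate_float_eq_alt (s : String) : generate_float s = generate_float_alt s := by
  simp only [generate_float, generate_float_alt]
  cases hl : s.toList with
  | nil => simp [pvValid]
  | cons a t =>
    have hs0 : String.ofList s.toList = s := String.ofList_toList
    cases t with
    | nil =>
      rw [hl] at hs0
      simp [pvValid, PySem.List.pyRange_one_eq_nil (by norm_num : (1:Int) ≤ 1), hs0,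
        PySem.List.pyGetD_zero_cons]
    | cons b t =>
      rw [hl] at hs0
      set L : List Char := a :: b :: t with hL
      have hLne : L ≠ [] := by simp [hL]
      have hlen0 : ¬ (L.length = 0) := by simp [hL]
      have hlen1 : ¬ (L.length = 1) := by simp [hL]
      have hlt : 1 < L.length := by simp [hL]
      have hslice : ∀ i : Int, i ∈ PySem.List.pyRange 1 (L.length : Int) 1 →
          PySem.List.slice L none (some i) = L.take i.toNat ∧
          PySem.List.slice L (some i) none = L.drop i.toNat ∧
          1 ≤ i.toNat ∧ i.toNat < L.length := by
        intro i hi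
        obtain ⟨h1, h2⟩ := PySem.List.mem_pyRange_one.mp hi
        refine ⟨PySem.List.slice_to L (by omega), PySem.List.slice_from L (by omega), by omega, by omega⟩
      by_cases c0 : PySem.List.pyGetD L 0 ' ' = '0' <;>
        by_cases cz : PySem.List.pyGetD L (-1) ' ' = '0'
      · -- leading and trailing '0': A returns []
        have hfilter : ∀ p ∈ ((L, ([] : List Char)) ::
            (PySem.List.pyRange 1 (L.length : Int) 1).map
              (fun i => (PySem.List.slice L none (some i), PySem.List.slice L (some i) none))),
            ¬ (pvValid p.1 p.2 = true) := by
          intro p hp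
          rcases List.mem_cons.mp hp with h | h
          · subst h; simp [pvValid, hLne, hlt, c0]
          · obtain ⟨i, hi, hgi⟩ := List.mem_map.mp h
            obtain ⟨hto, hfrom, hk1, hk2⟩ := hslice i hi
            subst hgi
            have hfr : L.drop i.toNat ≠ [] := by
              intro h; have := List.drop_eq_nil_iff.mp h; omega
            simp only [hto, hfrom, pvValid]
            rw [pyGetD_drop_last L i.toNat hk2]
            have cz' : PySem.List.pyGetD (a :: b :: t) (-1) ' ' = '0' := by
              simpa [hL] using cz
            by_cases hk : i.toNat = 1
            · simp [hk, cz', hL]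
            · have h1 : 1 < (L.take i.toNat).length := by
                rw [List.length_take]; omega
              rw [pyGetD_take_zero L i.toNat hk1 hLne]
              simp [c0, hfr, cz, List.take_eq_nil_iff]
        rw [List.filter_eq_nil_iff.mpr hfilter]
        simp [hlen0, hlt, c0, cz]
      · -- leading '0' only: single candidate 0.<rest>
        have hrange : PySem.List.pyRange 1 (L.length : Int) 1
            = 1 :: PySem.List.pyRange 2 (L.length : Int) 1 := by
          have := PySem.List.pyRange_one_cons (a := (1:Int)) (b := (L.length : Int)) (by exact_mod_cast hlt)
          simpa using this
        have ha : a = '0' := by simpa [hL, PySem.List.pyGetD_zero_cons] using c0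
        have hbt : PySem.List.pyGetD (b :: t) (-1) ' ' = PySem.List.pyGetD L (-1) ' ' := by
          have := pyGetD_drop_last L 1 (by omega)
          simpa [hL] using this
        have hv1 : pvValid [a] (b :: t) = true := by
          simp [pvValid, hbt, cz]
        have hrest : ∀ p ∈ (PySem.List.pyRange 2 (L.length : Int) 1).map
              (fun i => (PySem.List.slice L none (some i), PySem.List.slice L (some i) none)),
            ¬ (pvValid p.1 p.2 = true) := by
          intro p hp
          obtain ⟨i, hi, hgi⟩ := List.mem_map.mp hp
          obtain ⟨h2, hlt'⟩ := PySem.List.mem_pyRange_one.mp hi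
          have hto := PySem.List.slice_to L (b := i) (by omega)
          have hfrom := PySem.List.slice_from L (a := i) (by omega)
          subst hgi
          have h1 : 1 < (L.take i.toNat).length := by
            rw [List.length_take]; omega
          simp only [hto, hfrom, pvValid]
          rw [pyGetD_take_zero L i.toNat (by omega) hLne]
          simp [c0, List.take_eq_nil_iff]
          rintro _ (h | h) <;> omega
        have hsl1 : PySem.List.slice L (some 1) none = b :: t := by
          rw [PySem.List.slice_from L (by norm_num : (0:Int) ≤ 1)]
          simp [hL]
        have hto1 : PySem.List.slice L none (some 1) = [a] := by
          rw [PySem.List.slice_to L (by norm_num : (0:Int) ≤ 1)]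
          simp [hL]
        simp only [hlen0, hlt, c0, cz, true_and, false_or, if_pos,
          hrange, List.map_cons, List.filter_cons]
        rw [List.filter_eq_nil_iff.mpr hrest]
        have hvh : pvValid L [] = false := by simp [pvValid, hLne, hlt, c0]
        rw [hto1, hsl1, hvh, hv1]
        simp only [Bool.false_eq_true, if_false]
        simp [hlen1, ha]
        rw [show ('0' :: '.' :: b :: t) = ['0'] ++ ('.' :: b :: t) from rfl, String.ofList_append]
      · -- trailing '0' only: A returns [s]
        have hvhead : pvValid L [] = true := by simp [pvValid, hLne, c0]
        have hrest : ∀ p ∈ (PySem.List.pyRange 1 (L.length : Int) 1).map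
              (fun i => (PySem.List.slice L none (some i), PySem.List.slice L (some i) none)),
            ¬ (pvValid p.1 p.2 = true) := by
          intro p hp
          obtain ⟨i, hi, hgi⟩ := List.mem_map.mp hp
          obtain ⟨hto, hfrom, hk1, hk2⟩ := hslice i hi
          subst hgi
          have hfr : L.drop i.toNat ≠ [] := by
            intro h; have := List.drop_eq_nil_iff.mp h; omega
          simp only [hto, hfrom, pvValid]
          rw [pyGetD_drop_last L i.toNat hk2]
          simp [hfr, cz, List.take_eq_nil_iff]
        simp only [hlen0, hlt, c0, cz, and_true, true_and, false_or, if_pos,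
          List.filter_cons, hvhead]
        rw [List.filter_eq_nil_iff.mpr hrest]
        simp [hs0]
      · -- generic: every candidate kept
        have hvhead : pvValid L [] = true := by simp [pvValid, hLne, c0]
        have hall : ∀ p ∈ (PySem.List.pyRange 1 (L.length : Int) 1).map
              (fun i => (PySem.List.slice L none (some i), PySem.List.slice L (some i) none)),
            pvValid p.1 p.2 = true := by
          intro p hp
          obtain ⟨i, hi, hgi⟩ := List.mem_map.mp hp
          obtain ⟨hto, hfrom, hk1, hk2⟩ := hslice i hi
          subst hgi
          have hfr : L.drop i.toNat ≠ [] := by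
            intro h; have := List.drop_eq_nil_iff.mp h; omega
          have hwne : L.take i.toNat ≠ [] := by
            simp [List.take_eq_nil_iff]; omega
          simp only [hto, hfrom, pvValid]
          rw [pyGetD_drop_last L i.toNat hk2, pyGetD_take_zero L i.toNat hk1 hLne]
          simp [c0, hwne, hfr, cz]
        simp only [hlen0, hlt, c0, cz, true_and, false_or, if_pos,
          List.filter_cons, hvhead, List.filter_eq_self.mpr hall,
          PySem.List.foldl_append_singleton_eq_map
            (fun idx => String.ofList (PySem.List.slice L none (some idx) ++ '.' :: PySem.List.slice L (some idx) none))]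
        have hmap : List.map ((fun p : List Char × List Char =>
              if p.2 = [] then String.ofList p.1 else String.ofList (p.1 ++ '.' :: p.2)) ∘
              (fun i => (PySem.List.slice L none (some i), PySem.List.slice L (some i) none)))
              (PySem.List.pyRange 1 (L.length : Int) 1)
            = List.map (fun idx => String.ofList (PySem.List.slice L none (some idx) ++ '.' :: PySem.List.slice L (some idx) none))
              (PySem.List.pyRange 1 (L.length : Int) 1) := by
          apply List.map_congr_left
          intro i hi
          obtain ⟨hto, hfrom, hk1, hk2⟩ := hslice i hi
          have hfr : L.drop i.toNat ≠ [] := by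
            intro h; have := List.drop_eq_nil_iff.mp h; omega
          rw [Function.comp_apply, hto, hfrom, if_neg hfr]
        simp only [List.map_cons, List.map_map, hmap]
        simp [hs0]

-- ===== VERDICT =====
theorem generate_float_spec : Claim_equal_generate_float := by
  intro s _
  exact generate_float_eq_alt s
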